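-- pv_equiv track=rewrite | github.com/drupchen/pecha-merge | merge_folios_into_pages.py | create_triplets
-- ===== SOURCE A (Python) =====
-- def create_triplets(l, fillvalue):
--     def fill(current):
--         total = []
--         triplet = []
--         for c in current:
--             if len(triplet) < 3:
--                 triplet.append(c)
--             elif len(triplet) == 3:
--                 total.append(triplet)
--                 triplet = []
--                 triplet.append(c)
--         if triplet != []:
--             if len(triplet) == 1:
--                 triplet.append(fillvalue)
--                 triplet.append(fillvalue)
--             elif len(triplet) == 2:
--                 triplet.append(fillvalue)
--             total.append(triplet)
--         return total
--
--     current_odd = l[1:][::2]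
--     current_even = l[0:][::2]
--     odd_triplets = fill(current_odd)
--     even_triplets = fill(current_even)
--     return odd_triplets, even_triplets
-- ===== SOURCE B (Python) =====
-- def create_triplets(l, fillvalue):
--     def chunk(seq):
--         out = []
--         i = 0
--         while i < len(seq):
--             head = list(seq[i:i+3])
--             out.append(head + [fillvalue] * (3 - len(head)))
--             i += 3
--         return out
--     odd = l[1::2]
--     even = l[0::2]
--     return chunk(odd), chunk(even)
-- ===== Notes on version B (the rewrite author's own statement) =====
-- stated objective: simpler
-- what changed: Replaces A's element-by-element accumulator loop (with explicit flush and three separate padding branches) by parity slicing plus an index loop that slices three elements at a time and pads the slice by replication.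
import Mathlib
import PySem

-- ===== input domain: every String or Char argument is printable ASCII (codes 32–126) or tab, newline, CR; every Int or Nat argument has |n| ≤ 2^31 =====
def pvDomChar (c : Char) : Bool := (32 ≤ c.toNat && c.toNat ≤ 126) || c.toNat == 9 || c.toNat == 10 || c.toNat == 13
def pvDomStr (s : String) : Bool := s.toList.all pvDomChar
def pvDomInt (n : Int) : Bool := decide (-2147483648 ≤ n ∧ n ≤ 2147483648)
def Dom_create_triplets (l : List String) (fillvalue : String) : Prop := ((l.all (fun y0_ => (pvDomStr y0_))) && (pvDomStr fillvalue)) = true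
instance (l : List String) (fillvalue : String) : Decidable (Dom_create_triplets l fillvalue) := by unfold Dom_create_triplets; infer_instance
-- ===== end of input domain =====

-- B replaces A's element-by-element accumulator loop (with flush and three padding branches)
-- by parity slicing plus an index loop that slices three elements at a time and pads by replication: simpler.

-- ===== PORT A =====
-- xs[::2] has no PySem primitive; ported by hand: elements at indices 0,2,4,… (exact for step 2 over the whole list).
def pvEveryOther : List String → List String
  | [] => []
  | [a] => [a]
  | a :: _ :: rest => a :: pvEveryOther rest

-- the for-loop of A's inner `fill`, state (total, triplet)
def pvFillLoop (total : List (List String)) (triplet : List String) : List String → List (List String) × List String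
  | [] => (total, triplet)
  | c :: rest =>
    if triplet.length < 3 then pvFillLoop total (triplet ++ [c]) rest
    else if triplet.length == 3 then pvFillLoop (total ++ [triplet]) [c] rest
    else pvFillLoop total triplet rest

-- the code after A's loop: pad the leftover triplet and append it
def pvFillFinish (fillvalue : String) (p : List (List String) × List String) : List (List String) :=
  if p.2 ≠ [] then
    if p.2.length == 1 then p.1 ++ [p.2 ++ [fillvalue, fillvalue]]
    else if p.2.length == 2 then p.1 ++ [p.2 ++ [fillvalue]]
    else p.1 ++ [p.2]
  else p.1

def pvFill (fillvalue : String) (current : List String) : List (List String) :=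
  pvFillFinish fillvalue (pvFillLoop [] [] current)

def create_triplets (l : List String) (fillvalue : String) : List (List String) × List (List String) :=
  let current_odd := pvEveryOther (PySem.List.slice l (some 1) none)
  let current_even := pvEveryOther (PySem.List.slice l (some 0) none)
  (pvFill fillvalue current_odd, pvFill fillvalue current_even)

-- ===== PORT B =====
-- Source B's while-loop in `chunk`: slice out seq[i:i+3], pad by replication, step i by 3
def pvChunkLoop (fillvalue : String) (seq : List String) (i : Nat) (out : List (List String)) : List (List String) :=
  if _h : i < seq.length then
    let head := PySem.List.slice seq (some (i : Int)) (some ((i : Int) + 3))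
    pvChunkLoop fillvalue seq (i + 3) (out ++ [head ++ List.replicate (3 - head.length) fillvalue])
  else out
termination_by seq.length - i

def create_triplets_alt (l : List String) (fillvalue : String) : List (List String) × List (List String) :=
  -- l[1::2] and l[0::2] ported by hand via pvEveryOther (exact: step-2 slices)
  let odd := pvEveryOther (l.drop 1)
  let even := pvEveryOther l
  (pvChunkLoop fillvalue odd 0 [], pvChunkLoop fillvalue even 0 [])

-- ===== PRECONDITION & SPEC =====
def Spec_create_triplets (l : List String) (fillvalue : String) (out : List (List String) × List (List String)) : Prop := out = create_triplets_alt l fillvalue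
instance (l : List String) (fillvalue : String) (out : List (List String) × List (List String)) : Decidable (Spec_create_triplets l fillvalue out) := by unfold Spec_create_triplets; infer_instance

-- ===== CLAIM (what is proved, stated in full; the proofs are below) =====
def Claim_equal_create_triplets : Prop := ∀ (l : List String) (fillvalue : String), Dom_create_triplets l fillvalue → Spec_create_triplets l fillvalue (create_triplets l fillvalue)

-- ===== LEMMAS AND PROOFS =====

-- proof-side characterisation both ports are reduced to: chunks of three, last one padded
def pvChunkAux (f : String) : List String → List (List String)
  | [] => []
  | a :: rest =>
    ((a :: rest).take 3 ++ List.replicate (3 - ((a :: rest).take 3).length) f)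
      :: pvChunkAux f ((a :: rest).drop 3)
termination_by s => s.length
decreasing_by simp

lemma pvChunkAux_nil (f : String) : pvChunkAux f [] = [] := by simp [pvChunkAux.eq_def]

-- A's side: running fill's loop from (total, []) appends the chunks to total
lemma pvFill_run (f : String) : ∀ (n : Nat) (cur : List String), cur.length ≤ n → ∀ total,
    pvFillFinish f (pvFillLoop total [] cur) = total ++ pvChunkAux f cur := by
  intro n
  induction n with
  | zero =>
    intro cur h total
    have : cur = [] := List.length_eq_zero_iff.mp (Nat.le_zero.mp h)
    subst this; simp [pvFillLoop, pvFillFinish, pvChunkAux_nil]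
  | succ n ih =>
    intro cur h total
    match cur with
    | [] => simp [pvFillLoop, pvFillFinish, pvChunkAux_nil]
    | [a] => simp [pvFillLoop, pvFillFinish, pvChunkAux.eq_def]
    | [a, b] => simp [pvFillLoop, pvFillFinish, pvChunkAux.eq_def]
    | [a, b, c] => simp [pvFillLoop, pvFillFinish, pvChunkAux.eq_def]
    | a :: b :: c :: d :: rest =>
      have step : pvFillLoop total [] (a :: b :: c :: d :: rest)
          = pvFillLoop (total ++ [[a, b, c]]) [] (d :: rest) := by
        simp [pvFillLoop]
      have chunkstep : pvChunkAux f (a :: b :: c :: d :: rest) = [a, b, c] :: pvChunkAux f (d :: rest) := by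
        rw [pvChunkAux.eq_def]; simp
      rw [step, ih (d :: rest) (by simp at h ⊢; omega) (total ++ [[a, b, c]]), chunkstep]
      simp

-- B's side: the index loop from position i produces the chunks of the remaining suffix
lemma pvChunkLoop_run (f : String) (s : List String) : ∀ (k i : Nat), s.length - i ≤ k → ∀ out,
    pvChunkLoop f s i out = out ++ pvChunkAux f (s.drop i) := by
  intro k
  induction k with
  | zero =>
    intro i h out
    have hge : s.length ≤ i := by omega
    rw [pvChunkLoop]
    simp [Nat.not_lt.mpr hge, List.drop_eq_nil_of_le hge, pvChunkAux_nil]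
  | succ k ih =>
    intro i h out
    by_cases hlt : i < s.length
    · rw [pvChunkLoop]
      have hslice : PySem.List.slice s (some (i : Int)) (some ((i : Int) + 3))
          = (s.drop i).take 3 := by
        have := PySem.List.slice_natCast_add (xs := s) (j := i) (n := 3)
        simpa using this
      simp only [hlt, dif_pos, hslice]
      rw [ih (i + 3) (by omega)]
      obtain ⟨a, rest, hd⟩ := List.exists_cons_of_ne_nil
        (by simp [List.drop_eq_nil_iff]; omega : s.drop i ≠ [])
      have hdrop : (s.drop i).drop 3 = s.drop (i + 3) := by
        rw [List.drop_drop]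
      conv_rhs => rw [hd, pvChunkAux.eq_def]
      simp only [← hd, hdrop]
      simp
    · rw [pvChunkLoop]
      simp [hlt, List.drop_eq_nil_of_le (Nat.not_lt.mp hlt), pvChunkAux_nil]

lemma pvFill_eq (f : String) (cur : List String) : pvFill f cur = pvChunkAux f cur := by
  simpa using pvFill_run f cur.length cur le_rfl []

lemma pvChunkLoop_eq (f : String) (s : List String) : pvChunkLoop f s 0 [] = pvChunkAux f s := by
  simpa using pvChunkLoop_run f s s.length 0 (by omega) []

-- ===== VERDICT (by name: the statement is the Claim_ definition above) =====
theorem create_triplets_spec : Claim_equal_create_triplets := by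
  intro l f _
  show _ = _
  unfold create_triplets create_triplets_alt
  simp [PySem.List.slice_from_one, PySem.List.slice_none_none, pvFill_eq, pvChunkLoop_eq,
    List.drop_one]
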